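-- pv_equiv track=rewrite | github.com/Draiget/faf-re | scripts/ida/ida_vftable_rtti_dump.py | infer_owner_from_concat_prefix
-- ===== SOURCE A (Python) =====
-- def infer_owner_from_concat_prefix(cls_name: str, known_class_names: set) -> str or None:
--     """
--     Infer owner when class name starts with an existing class name (case-insensitive),
--     typical for FooBar / FooBar_LuaFuncDef -> owner Foo, method Bar.
--     Choose the longest matching owner prefix with next char being uppercase (or end/_).
--     """
--     lname = cls_name.lower()
--     best = None
--     for k in known_class_names:
--         lk = k.lower()
--         if lname.startswith(lk):
--             # forbid exact match (self is not an owner)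
--             if len(cls_name) == len(k):
--                 continue
--             nxt = cls_name[len(k):len(k)+1]
--             if not (nxt and (nxt.isupper() or nxt == "_")):
--                 continue
--             if best is None or len(k) > len(best):
--                 best = k
--     return best
-- ===== SOURCE B (Python) =====
-- def infer_owner_from_concat_prefix(cls_name: str, known_class_names: set) -> str or None:
--     # Scan candidate split positions of cls_name from longest to shortest against a
--     # prebuilt set of lowercased known names, instead of testing every known name.
--     lowered = {k.lower() for k in known_class_names}
--     lname = cls_name.lower()
--     for d in range(len(cls_name) - 1, -1, -1):
--         c = cls_name[d]
--         if (c.isupper() or c == "_") and lname[:d] in lowered: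
--             for k in known_class_names:
--                 if k.lower() == lname[:d]:
--                     return k
--     return None
-- ===== Notes on version B (the rewrite author's own statement) =====
-- stated objective: alternative
-- what changed: Instead of scanning every known name and keeping the longest match, B builds a set of lowercased names once and walks candidate split positions of cls_name from longest to shortest, returning at the first position whose prefix is in the set (with one scan of the set to recover the original-case name).
import Mathlib
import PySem

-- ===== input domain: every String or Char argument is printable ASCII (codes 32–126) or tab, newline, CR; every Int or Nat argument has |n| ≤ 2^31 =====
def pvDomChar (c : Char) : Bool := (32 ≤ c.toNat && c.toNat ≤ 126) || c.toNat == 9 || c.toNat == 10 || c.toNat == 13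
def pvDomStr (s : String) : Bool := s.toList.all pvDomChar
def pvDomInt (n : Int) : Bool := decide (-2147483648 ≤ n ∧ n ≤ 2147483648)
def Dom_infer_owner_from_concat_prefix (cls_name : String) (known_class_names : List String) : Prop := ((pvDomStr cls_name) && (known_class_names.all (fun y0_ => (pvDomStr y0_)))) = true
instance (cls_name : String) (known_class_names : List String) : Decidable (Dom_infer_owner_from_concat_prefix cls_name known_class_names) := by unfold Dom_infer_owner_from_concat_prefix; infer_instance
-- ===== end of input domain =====

-- B replaces A's scan over all known names (keeping the longest match) by a walk over split
-- positions of cls_name from longest to shortest against a prebuilt set of lowercased names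
-- (objective: alternative decomposition, similar cost).

-- ===== PORT A =====
-- loop body of A's 'for k in known_class_names'
def pvStepA (cls_name lname : String) (best : Option String) (k : String) : Option String :=
  let lk := PySem.Str.lower k
  if PySem.Str.startswith lname lk then
    -- forbid exact match (self is not an owner)
    if PySem.Str.len cls_name == PySem.Str.len k then best
    else
      let nxt := PySem.Str.slice cls_name (some (PySem.Str.len k)) (some (PySem.Str.len k + 1))
      -- 'nxt and (nxt.isupper() or nxt == "_")' on the ≤1-char slice, via its character
      -- (exact: s.isupper() on a 1-char ASCII string is the char test, and '' is falsy)
      if !(match nxt.toList with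
            | [c] => PySem.Chars.isupper c || c == '_'
            | _ => false) then best
      else
        match best with
        | none => some k
        | some b => if PySem.Str.len b < PySem.Str.len k then some k else best
  else best

def infer_owner_from_concat_prefix (cls_name : String) (known_class_names : List String) : Option String :=
  let lname := PySem.Str.lower cls_name
  known_class_names.foldl (pvStepA cls_name lname) none

-- ===== PORT B =====
-- inner 'for k in known_class_names: if k.lower() == lname[:d]: return k'
def pvAltFind (pref : List Char) : List String → Option String
  | [] => none
  | k :: rest => if PySem.Chars.lower k.toList == pref then some k else pvAltFind pref rest

-- 'for d in range(len(cls_name) - 1, -1, -1)', counting down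
def pvAltLoop (cls lname : List Char) (lowered : PySem.Set (List Char)) (known : List String) : Nat → Option String
  | 0 => none
  | d + 1 =>
    -- c = cls_name[d]; d < len(cls_name) throughout the loop, so getD's default is unreachable
    let c := cls.getD d ' '
    if (PySem.Chars.isupper c || c == '_') && PySem.Set.contains lowered (lname.take d) then
      match pvAltFind (lname.take d) known with
      | some k => some k
      | none => pvAltLoop cls lname lowered known d
    else pvAltLoop cls lname lowered known d

def infer_owner_from_concat_prefix_alt (cls_name : String) (known_class_names : List String) : Option String :=
  let lowered : PySem.Set (List Char) :=
    PySem.Set.ofList (known_class_names.map (fun k => PySem.Chars.lower k.toList))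
  let lname := PySem.Chars.lower cls_name.toList
  pvAltLoop cls_name.toList lname lowered known_class_names cls_name.toList.length

-- ===== PRECONDITION & SPEC =====
def Spec_infer_owner_from_concat_prefix (cls_name : String) (known_class_names : List String) (out : Option String) : Prop := out = infer_owner_from_concat_prefix_alt cls_name known_class_names
instance (cls_name : String) (known_class_names : List String) (out : Option String) : Decidable (Spec_infer_owner_from_concat_prefix cls_name known_class_names out) := by unfold Spec_infer_owner_from_concat_prefix; infer_instance

-- ===== CLAIM (what is proved, stated in full; the proofs are below) =====
def Claim_equal_infer_owner_from_concat_prefix : Prop := ∀ (cls_name : String) (known_class_names : List String), Dom_infer_owner_from_concat_prefix cls_name known_class_names → Spec_infer_owner_from_concat_prefix cls_name known_class_names (infer_owner_from_concat_prefix cls_name known_class_names)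

-- ===== LEMMAS AND PROOFS =====

-- 'next char is uppercase or _' at split position d
def pvOkB (cls : List Char) (d : Nat) : Bool :=
  PySem.Chars.isupper (cls.getD d ' ') || cls.getD d ' ' == '_'

-- 'k.lower() == lname[:d]'
def pvPred (lname : List Char) (d : Nat) (k : String) : Bool :=
  PySem.Chars.lower k.toList == lname.take d

-- split position d is usable with class-name list l
def pvGuard (cls : List Char) (l : List String) (d : Nat) : Bool :=
  pvOkB cls d && l.any (pvPred (PySem.Chars.lower cls) d)

-- reference recursion both ports are reduced to: positions d = m-1, …, 0
def pvF (cls : List Char) (l : List String) : Nat → Option String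
  | 0 => none
  | d + 1 =>
    if pvGuard cls l d then l.find? (pvPred (PySem.Chars.lower cls) d)
    else pvF cls l d

-- A's per-name test, in terms of the name's length as split position
def pvMatches (cls : List Char) (k : String) : Bool :=
  pvPred (PySem.Chars.lower cls) k.toList.length k
    && decide (k.toList.length < cls.length) && pvOkB cls k.toList.length

theorem pv_take_one_drop (cls : List Char) (d : Nat) :
    (cls.drop d).take 1 = if d < cls.length then [cls.getD d ' '] else [] := by
  by_cases h : d < cls.length
  · simp [h, List.take_one, List.head?_drop, List.getD]
  · simp [h, List.drop_eq_nil_of_le (by omega : cls.length ≤ d)]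

theorem pv_length_lower (l : List Char) : (PySem.Chars.lower l).length = l.length := by
  simp [PySem.Chars.lower]

theorem pv_step_eq (cls_name : String) (best : Option String) (k : String) :
    pvStepA cls_name (PySem.Str.lower cls_name) best k =
      if pvMatches cls_name.toList k then
        match best with
        | none => some k
        | some b => if b.toList.length < k.toList.length then some k else best
      else best := by
  have hswa : PySem.Str.startswith (PySem.Str.lower cls_name) (PySem.Str.lower k) =
      PySem.Chars.startswith (PySem.Chars.lower cls_name.toList) (PySem.Chars.lower k.toList) := by
    rw [PySem.Str.startswith_eq, PySem.Str.toList_lower, PySem.Str.toList_lower]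
  by_cases hpre : PySem.Chars.lower k.toList <+: PySem.Chars.lower cls_name.toList
  · have hle : k.toList.length ≤ cls_name.toList.length := by
      have := hpre.length_le; simpa [pv_length_lower] using this
    have hpred : pvPred (PySem.Chars.lower cls_name.toList) k.toList.length k = true := by
      simp only [pvPred, beq_iff_eq]
      have := List.prefix_iff_eq_take.mp hpre
      simpa [pv_length_lower] using this
    have hsw : PySem.Str.startswith (PySem.Str.lower cls_name) (PySem.Str.lower k) = true := by
      rw [hswa]; exact (PySem.Chars.startswith_iff _ _).mpr hpre
    rw [pvStepA.eq_def]
    simp only [hsw, if_true]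
    by_cases heq : cls_name.toList.length = k.toList.length
    · have h1 : (PySem.Str.len cls_name == PySem.Str.len k) = true := by
        simp only [PySem.Str.len_eq, beq_iff_eq, Nat.cast_inj]; exact heq
      have hm2 : pvMatches cls_name.toList k = false := by
        simp only [pvMatches, Bool.and_eq_false_iff]
        left; right; simp [heq]
      rw [h1, hm2]
      simp
    · have hlt : k.toList.length < cls_name.toList.length := by omega
      have h1 : (PySem.Str.len cls_name == PySem.Str.len k) = false := by
        simp only [PySem.Str.len_eq, beq_eq_false_iff_ne, ne_eq, Nat.cast_inj]; exact heq
      have hslice : (PySem.Str.slice cls_name (some (PySem.Str.len k)) (some (PySem.Str.len k + 1))).toList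
          = [cls_name.toList.getD k.toList.length ' '] := by
        rw [PySem.Str.toList_slice, PySem.Str.len_eq]
        show PySem.List.slice _ _ _ = _
        rw [show ((k.toList.length : Int) + 1) = ((k.toList.length : Int) + ((1:Nat) : Int)) by push_cast; ring]
        rw [PySem.List.slice_natCast_add, pv_take_one_drop, if_pos hlt]
      rw [h1, hslice]
      simp only [Bool.false_eq_true, if_false]
      by_cases hok : pvOkB cls_name.toList k.toList.length = true
      · have hm2 : pvMatches cls_name.toList k = true := by
          simp only [pvMatches, hpred, hok, Bool.and_eq_true, and_true, true_and]
          simpa using hlt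
        have hokv : (PySem.Chars.isupper (cls_name.toList.getD k.toList.length ' ')
            || cls_name.toList.getD k.toList.length ' ' == '_') = true := hok
        rw [hm2]
        simp only [hokv, Bool.not_true, Bool.false_eq_true, if_false, if_true]
        cases best with
        | none => rfl
        | some b => simp only [PySem.Str.len_eq, Nat.cast_lt]
      · have hm2 : pvMatches cls_name.toList k = false := by
          simp only [pvMatches, Bool.and_eq_false_iff]
          right; exact Bool.eq_false_iff.mpr hok
        rw [hm2]
        simp only [pvOkB] at hok
        simp at hok
        simp [hok.1, hok.2]
  · have hsw : PySem.Str.startswith (PySem.Str.lower cls_name) (PySem.Str.lower k) = false := by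
      rw [hswa]; simp only [Bool.eq_false_iff]
      intro h; exact hpre ((PySem.Chars.startswith_iff _ _).mp h)
    have hm : pvMatches cls_name.toList k = false := by
      simp only [pvMatches, Bool.and_eq_false_iff]
      left; left
      simp only [pvPred, beq_eq_false_iff_ne, ne_eq]
      intro h
      exact hpre (by rw [h]; exact List.take_prefix _ _)
    rw [pvStepA.eq_def]
    simp only [hsw, hm, Bool.false_eq_true, if_false]

theorem pv_pred_length (cls : List Char) (d : Nat) (k : String) (hd : d < cls.length)
    (h : pvPred (PySem.Chars.lower cls) d k = true) : k.toList.length = d := by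
  simp only [pvPred, beq_iff_eq] at h
  have := congrArg List.length h
  simp only [pv_length_lower, List.length_take] at this
  omega

theorem pv_find_length (cls : List Char) (l : List String) (d : Nat) (b : String)
    (hd : d < cls.length)
    (h : l.find? (pvPred (PySem.Chars.lower cls) d) = some b) : b.toList.length = d :=
  pv_pred_length cls d b hd (List.find?_some h)

theorem pvF_nil (cls : List Char) (m : Nat) : pvF cls [] m = none := by
  induction m with
  | zero => rfl
  | succ d ih => simp [pvF, pvGuard, ih]

theorem pvF_length (cls : List Char) (l : List String) (m : Nat) (b : String)
    (hm : m ≤ cls.length) (h : pvF cls l m = some b) : b.toList.length < m := by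
  induction m with
  | zero => simp [pvF] at h
  | succ d ih =>
    rw [pvF] at h
    by_cases hg : pvGuard cls l d = true
    · rw [if_pos hg] at h
      have := pv_find_length cls l d b (by omega) h
      omega
    · rw [if_neg hg] at h
      have := ih (by omega) h
      omega

-- a name that fails A's test changes no guard and no find? result

theorem pvF_append_no (cls : List Char) (l : List String) (k : String)
    (hk : pvMatches cls k = false) (m : Nat) (hm : m ≤ cls.length) :
    pvF cls (l ++ [k]) m = pvF cls l m := by
  induction m with
  | zero => rfl
  | succ d ih =>
    have hdn : d < cls.length := by omega
    have hpk : pvPred (PySem.Chars.lower cls) d k = false ∨ pvOkB cls d = false := by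
      by_cases hp : pvPred (PySem.Chars.lower cls) d k = true
      · right
        have hlen := pv_pred_length cls d k hdn hp
        simp only [pvMatches, hlen] at hk
        rcases Bool.and_eq_false_iff.mp hk with h | h
        · rcases Bool.and_eq_false_iff.mp h with h' | h'
          · rw [hp] at h'; simp at h'
          · exact absurd hdn (by simpa using h')
        · exact h
      · left; simpa using hp
    have hguard : pvGuard cls (l ++ [k]) d = pvGuard cls l d := by
      rcases hpk with hp | ho
      · simp [pvGuard, List.any_append, hp]
      · simp [pvGuard, ho]
    rw [pvF, pvF, hguard, ih (by omega)]
    rcases hpk with hp | ho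
    · rw [List.find?_append]
      simp [List.find?, hp]
    · have : pvGuard cls l d = false := by simp [pvGuard, ho]
      rw [this]
      simp

theorem pv_aux (cls_name : String) (l : List String) (k : String)
    (hk : pvMatches cls_name.toList k = true) (j : Nat)
    (hj : k.toList.length + 1 + j ≤ cls_name.toList.length) :
    pvStepA cls_name (PySem.Str.lower cls_name) (pvF cls_name.toList l (k.toList.length + 1 + j)) k
      = pvF cls_name.toList (l ++ [k]) (k.toList.length + 1 + j) := by
  have hk' := hk
  simp only [pvMatches, Bool.and_eq_true, decide_eq_true_eq] at hk'
  obtain ⟨⟨hpd, hdn⟩, hok⟩ := hk'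
  induction j with
  | zero =>
    simp only [Nat.add_zero]
    have hany : (l ++ [k]).any (pvPred (PySem.Chars.lower cls_name.toList) k.toList.length) = true := by
      rw [List.any_eq_true]; exact ⟨k, by simp, hpd⟩
    have hguard : pvGuard cls_name.toList (l ++ [k]) k.toList.length = true := by
      simp only [pvGuard, hok, hany, Bool.and_self]
    rw [pv_step_eq, if_pos hk]
    conv_rhs => rw [pvF]
    rw [if_pos hguard, List.find?_append]
    by_cases hga : l.any (pvPred (PySem.Chars.lower cls_name.toList) k.toList.length) = true
    · have hsome : (l.find? (pvPred (PySem.Chars.lower cls_name.toList) k.toList.length)).isSome := by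
        rw [List.find?_isSome]; exact List.any_eq_true.mp hga
      obtain ⟨b, hb⟩ := Option.isSome_iff_exists.mp hsome
      have hbl := pv_find_length cls_name.toList l k.toList.length b hdn hb
      have hgl : pvGuard cls_name.toList l k.toList.length = true := by
        simp only [pvGuard, hok, hga, Bool.and_self]
      have hFl : pvF cls_name.toList l (k.toList.length + 1) = some b := by
        rw [pvF, if_pos hgl, hb]
      rw [hFl, hb]
      have hnlt : ¬ b.toList.length < k.toList.length := by omega
      simp only [Option.or, if_neg hnlt]
    · have hnone : l.find? (pvPred (PySem.Chars.lower cls_name.toList) k.toList.length) = none := by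
        rw [List.find?_eq_none]
        intro x hx hpx
        exact absurd (List.any_eq_true.mpr ⟨x, hx, hpx⟩) (by simpa using hga)
      have hgl : pvGuard cls_name.toList l k.toList.length = false := by
        simp only [pvGuard, Bool.and_eq_false_iff]; right; exact Bool.eq_false_iff.mpr hga
      have hFl : pvF cls_name.toList l (k.toList.length + 1)
          = pvF cls_name.toList l k.toList.length := by
        rw [pvF, if_neg (by rw [hgl]; simp)]
      rw [hFl, hnone]
      rcases hres : pvF cls_name.toList l k.toList.length with _ | b
      · simp only [List.find?, hpd, Option.or]
      · have hblt : b.toList.length < k.toList.length :=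
          pvF_length cls_name.toList l k.toList.length b (by omega) hres
        simp only [List.find?, hpd, Option.or, if_pos hblt]
  | succ j ih =>
    have hij := ih (by omega)
    set e := k.toList.length + 1 + j with he
    have hen : e < cls_name.toList.length := by omega
    have hpe : pvPred (PySem.Chars.lower cls_name.toList) e k = false := by
      by_cases hp : pvPred (PySem.Chars.lower cls_name.toList) e k = true
      · have := pv_pred_length cls_name.toList e k hen hp; omega
      · simpa using hp
    have hguard : pvGuard cls_name.toList (l ++ [k]) e = pvGuard cls_name.toList l e := by
      simp [pvGuard, List.any_append, hpe]
    have hstep : k.toList.length + 1 + (j+1) = e + 1 := by omega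
    rw [hstep]
    by_cases hg : pvGuard cls_name.toList l e = true
    · have hga : l.any (pvPred (PySem.Chars.lower cls_name.toList) e) = true := by
        simp only [pvGuard, Bool.and_eq_true] at hg; exact hg.2
      have hsome : (l.find? (pvPred (PySem.Chars.lower cls_name.toList) e)).isSome := by
        rw [List.find?_isSome]; exact List.any_eq_true.mp hga
      obtain ⟨b, hb⟩ := Option.isSome_iff_exists.mp hsome
      have hbl := pv_find_length cls_name.toList l e b hen hb
      have hFl : pvF cls_name.toList l (e + 1) = some b := by rw [pvF, if_pos hg, hb]
      have hFr : pvF cls_name.toList (l ++ [k]) (e + 1) = some b := by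
        rw [pvF, if_pos (by rw [hguard]; exact hg), List.find?_append, hb]; rfl
      rw [hFl, hFr, pv_step_eq, if_pos hk]
      have hlt : b.toList.length < k.toList.length → False := by omega
      simp only [if_neg hlt]
    · have hFl : pvF cls_name.toList l (e + 1) = pvF cls_name.toList l e := by
        rw [pvF, if_neg (by simp [hg])]
      have hFr : pvF cls_name.toList (l ++ [k]) (e + 1) = pvF cls_name.toList (l ++ [k]) e := by
        rw [pvF, if_neg (by simp [hguard]; simpa using hg)]
      rw [hFl, hFr]
      exact hij

theorem pv_A_eq_F (cls_name : String) (l : List String) :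
    l.foldl (pvStepA cls_name (PySem.Str.lower cls_name)) none
      = pvF cls_name.toList l cls_name.toList.length := by
  induction l using List.reverseRecOn with
  | nil => rw [pvF_nil]; rfl
  | append_singleton l k ih =>
    rw [List.foldl_append, ih]
    simp only [List.foldl_cons, List.foldl_nil]
    by_cases hm : pvMatches cls_name.toList k = true
    · have hdn : k.toList.length < cls_name.toList.length := by
        simp only [pvMatches, Bool.and_eq_true, decide_eq_true_eq] at hm
        exact hm.1.2
      have hn : cls_name.toList.length = k.toList.length + 1 + (cls_name.toList.length - k.toList.length - 1) := by
        omega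
      rw [hn]
      exact pv_aux cls_name l k hm _ (by omega)
    · rw [pv_step_eq, if_neg (by simpa using hm),
        pvF_append_no cls_name.toList l k (by simpa using hm) _ (le_refl _)]

theorem pvAltFind_eq_find? (pref : List Char) (l : List String) :
    pvAltFind pref l = l.find? (fun k => PySem.Chars.lower k.toList == pref) := by
  induction l with
  | nil => rfl
  | cons k rest ih =>
    rw [pvAltFind, List.find?]
    by_cases h : (PySem.Chars.lower k.toList == pref) = true
    · simp [h]
    · simp only [Bool.not_eq_true] at h
      simp [h, ih]

theorem pv_contains_eq_any (cls : List Char) (known : List String) (d : Nat) :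
    PySem.Set.contains (PySem.Set.ofList (known.map (fun k => PySem.Chars.lower k.toList)))
        ((PySem.Chars.lower cls).take d)
      = known.any (pvPred (PySem.Chars.lower cls) d) := by
  rw [Bool.eq_iff_iff]
  rw [PySem.Set.contains_iff, PySem.Set.mem_ofList, List.mem_map, List.any_eq_true]
  constructor
  · rintro ⟨k, hk, hval⟩
    exact ⟨k, hk, by simp [pvPred, hval]⟩
  · rintro ⟨k, hk, hp⟩
    exact ⟨k, hk, by simpa [pvPred] using hp⟩

theorem pv_B_eq_F (cls : List Char) (known : List String) (m : Nat) :
    pvAltLoop cls (PySem.Chars.lower cls)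
        (PySem.Set.ofList (known.map (fun k => PySem.Chars.lower k.toList))) known m
      = pvF cls known m := by
  induction m with
  | zero => rfl
  | succ d ih =>
    rw [pvAltLoop, pvF]
    simp only [pv_contains_eq_any]
    have hcond : ((PySem.Chars.isupper (cls.getD d ' ') || cls.getD d ' ' == '_')
        && known.any (pvPred (PySem.Chars.lower cls) d)) = pvGuard cls known d := rfl
    rw [hcond]
    by_cases hg : pvGuard cls known d = true
    · rw [if_pos hg, if_pos hg]
      have hga : known.any (pvPred (PySem.Chars.lower cls) d) = true := by
        simp only [pvGuard, Bool.and_eq_true] at hg; exact hg.2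
      have hsome : (known.find? (pvPred (PySem.Chars.lower cls) d)).isSome := by
        rw [List.find?_isSome]; exact List.any_eq_true.mp hga
      obtain ⟨b, hb⟩ := Option.isSome_iff_exists.mp hsome
      rw [pvAltFind_eq_find?]
      have : (fun k => PySem.Chars.lower k.toList == (PySem.Chars.lower cls).take d)
          = pvPred (PySem.Chars.lower cls) d := rfl
      rw [this, hb]
    · rw [if_neg hg, if_neg hg]
      exact ih

-- ===== VERDICT (by name: the statement is the Claim_ definition above) =====
theorem infer_owner_from_concat_prefix_spec : Claim_equal_infer_owner_from_concat_prefix := by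
  intro cls_name known_class_names _
  unfold Spec_infer_owner_from_concat_prefix
  unfold infer_owner_from_concat_prefix infer_owner_from_concat_prefix_alt
  simp only []
  rw [pv_A_eq_F]
  exact (pv_B_eq_F cls_name.toList known_class_names cls_name.toList.length).symm
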